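-- pv_equiv track=rewrite | github.com/morgannewellsun/icu_hypotheses | generator/code_generator_modified_2.py | visits_to_seq_naive
-- ===== SOURCE A (Python) =====
-- def offset_medical_codes(patients, dictionary, offset):
--     """
--     Takes in a list of patient me as a list of visits.
--     Add a fixed offset to all medical codes, and update the dictionary.
--
--     Arguments:
--     patients: list of patients; each is a list of visits; each is a list of medical codes
--     dictionary (optional): dictionary of medical code definitions, or None
--     offset: integer offset to add to all medical codes
--
--     Returns:
--     patients_offset: list of patients; each is a list of visits; each is a list of offset medical codes
--     dictionary_offset: dictionary of offset medical code definitions, if input dictionary was provided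
--     """
--     patients_offset = []
--     for patient in patients:
--         patient_offset = []
--         for visit in patient:
--             visit_offset = []
--             for code in visit:
--                 visit_offset.append(code + offset)
--             patient_offset.append(visit_offset)
--         patients_offset.append(patient_offset)
--     if dictionary is None:
--         return patients_offset, None
--     else:
--         dictionary_offset = dict()
--         for code, value in dictionary.items():
--             dictionary_offset.update({code+offset: value})
--         return patients_offset, dictionary_offset
--
-- def visits_to_seq_naive(patients, outcomes, dictionary):
--     """
--     Unnests patients into a flat sequences, and applies outcomes as medical codes.
--     Does so in a manner which loses separation between visits.
--     Does NOT pad or take subsequences.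
--
--     Arguments:
--     patients: list of patients; each is a list of visits; each is a list of medical codes
--     outcomes: list of patient outcomes
--     dictionary (optional): dictionary of medical code definitions, or None
--
--     Returns:
--     patients_seq: list of patients; each is a list of medical codes including outcome codes
--     dictionary_offset: dictionary of offset medical code definitions, if input dictionary was provided
--     """
--
--     # Offset all medical codes by 3 (0 = pad, 1 = survival, 2 = mortality)
--     patients_offset, dictionary_offset = offset_medical_codes(patients, dictionary, offset=3)
--     if dictionary is not None:
--         dictionary_offset.update({
--             0: "padding",
--             1: "outcome_survival",
--             2: "outcome_mortality"
--         })
--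
--     # Flatten each patient into a sequence
--     patients_seq = []
--     for patient in patients_offset:
--         patient_seq = []
--         for visit in patient:
--             patient_seq.extend(visit)
--         patients_seq.append(patient_seq)
--
--     # Append outcomes as medical codes
--     for patient_seq, mortality in zip(patients_seq, outcomes):
--         patient_seq.append(2 if mortality else 1)
--
--     # Return
--     return patients_seq, dictionary_offset
-- ===== SOURCE B (Python) =====
-- def visits_to_seq_naive(patients, outcomes, dictionary):
--     # Flatten each patient's visits into one code sequence, offsetting codes
--     # by 3 to make room for the special codes 0/1/2.
--     patients_seq = [[code + 3 for visit in patient for code in visit]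
--                     for patient in patients]
--     for seq, mortality in zip(patients_seq, outcomes):
--         seq.append(2 if mortality else 1)
--     if dictionary is None:
--         return patients_seq, None
--     codes = {code + 3: desc for code, desc in dictionary.items()}
--     codes.update({0: "padding", 1: "outcome_survival", 2: "outcome_mortality"})
--     return patients_seq, codes
-- ===== Notes on version B (the rewrite author's own statement) =====
-- stated objective: simpler
-- what changed: Replaces A's three-stage pipeline (an offset helper building a full nested offset copy, then a separate flatten pass, then the outcome loop) with one fused comprehension that offsets and flattens each patient in a single pass, and a direct dict comprehension instead of the helper's dictionary loop.
import Mathlib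
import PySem

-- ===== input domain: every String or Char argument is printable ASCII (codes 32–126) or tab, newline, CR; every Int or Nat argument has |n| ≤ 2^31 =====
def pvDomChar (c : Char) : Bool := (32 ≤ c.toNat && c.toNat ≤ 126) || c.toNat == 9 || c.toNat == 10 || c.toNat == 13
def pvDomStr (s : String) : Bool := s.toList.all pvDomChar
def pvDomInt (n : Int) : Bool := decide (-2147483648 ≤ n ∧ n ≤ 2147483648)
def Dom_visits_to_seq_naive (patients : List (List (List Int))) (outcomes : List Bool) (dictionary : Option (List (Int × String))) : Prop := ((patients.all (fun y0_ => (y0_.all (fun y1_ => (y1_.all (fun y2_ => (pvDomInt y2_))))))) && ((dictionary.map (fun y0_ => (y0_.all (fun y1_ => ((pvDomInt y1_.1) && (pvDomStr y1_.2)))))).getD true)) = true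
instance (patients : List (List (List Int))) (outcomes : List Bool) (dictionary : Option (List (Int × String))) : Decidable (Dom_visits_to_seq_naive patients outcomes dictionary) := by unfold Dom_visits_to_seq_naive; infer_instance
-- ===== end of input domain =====

-- B fuses A's offset helper and separate flatten pass into one offset-and-flatten pass per
-- patient, with a direct dict comprehension (objective: simpler decomposition, same cost).
-- Both Pythons mutate only lists they built themselves; the claim is about the return value.

-- ===== PORT A =====
-- helper offset_medical_codes: three nested append loops, then the dictionary loop
def offset_medical_codes (patients : List (List (List Int))) (dictionary : Option (List (Int × String))) (offset : Int) :
    List (List (List Int)) × Option (PySem.Dict Int String) :=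
  let patients_offset := patients.foldl (fun acc patient =>
    acc ++ [patient.foldl (fun pacc visit =>
      pacc ++ [visit.foldl (fun vacc code => vacc ++ [code + offset]) []]) []]) []
  match dictionary with
  | none => (patients_offset, none)
  | some d =>
      (patients_offset,
       some (d.foldl (fun acc cv => acc.insert (cv.1 + offset) cv.2) (PySem.Dict.empty : PySem.Dict Int String)))

def visits_to_seq_naive (patients : List (List (List Int))) (outcomes : List Bool) (dictionary : Option (List (Int × String))) : List (List Int) × (Option (List (Int × String))) :=
  let po := offset_medical_codes patients dictionary 3
  let patients_offset := po.1
  -- if dictionary is not None: dictionary_offset.update({0:…,1:…,2:…})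
  let dictionary_offset : Option (PySem.Dict Int String) :=
    match po.2 with
    | none => none
    | some dd => some (((dd.insert 0 "padding").insert 1 "outcome_survival").insert 2 "outcome_mortality")
  -- flatten each patient
  let patients_seq := patients_offset.foldl (fun acc patient =>
    acc ++ [patient.foldl (fun pacc visit => pacc ++ visit) []]) []
  -- for patient_seq, mortality in zip(...): patient_seq.append(2 if mortality else 1)
  let patients_seq2 :=
    (patients_seq.zip outcomes).map (fun pm => pm.1 ++ [if pm.2 then (2 : Int) else 1])
    ++ patients_seq.drop outcomes.length
  (patients_seq2, dictionary_offset.map PySem.Dict.items)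

-- ===== PORT B =====
-- [code + 3 for visit in patient for code in visit]
def pvOffsetFlat (patient : List (List Int)) : List Int :=
  patient.flatMap (fun visit => visit.map (· + 3))

def visits_to_seq_naive_alt (patients : List (List (List Int))) (outcomes : List Bool) (dictionary : Option (List (Int × String))) : List (List Int) × (Option (List (Int × String))) :=
  let patients_seq := patients.map pvOffsetFlat
  -- for seq, mortality in zip(patients_seq, outcomes): seq.append(2 if mortality else 1)
  let patients_seq2 :=
    (patients_seq.zip outcomes).map (fun pm => pm.1 ++ [if pm.2 then (2 : Int) else 1])
    ++ patients_seq.drop outcomes.length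
  match dictionary with
  | none => (patients_seq2, none)
  | some d =>
      let codes := d.foldl (fun acc cv => acc.insert (cv.1 + 3) cv.2) (PySem.Dict.empty : PySem.Dict Int String)
      (patients_seq2,
       some (((codes.insert 0 "padding").insert 1 "outcome_survival").insert 2 "outcome_mortality").items)

-- ===== PRECONDITION & SPEC =====
def Spec_visits_to_seq_naive (patients : List (List (List Int))) (outcomes : List Bool) (dictionary : Option (List (Int × String))) (out : List (List Int) × (Option (List (Int × String)))) : Prop := out = visits_to_seq_naive_alt patients outcomes dictionary
instance (patients : List (List (List Int))) (outcomes : List Bool) (dictionary : Option (List (Int × String))) (out : List (List Int) × (Option (List (Int × String)))) : Decidable (Spec_visits_to_seq_naive patients outcomes dictionary out) := by unfold Spec_visits_to_seq_naive; infer_instance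

-- ===== CLAIM (what is proved, stated in full; the proofs are below) =====
def Claim_equal_visits_to_seq_naive : Prop := ∀ (patients : List (List (List Int))) (outcomes : List Bool) (dictionary : Option (List (Int × String))), Dom_visits_to_seq_naive patients outcomes dictionary → Spec_visits_to_seq_naive patients outcomes dictionary (visits_to_seq_naive patients outcomes dictionary)

-- ===== LEMMAS AND PROOFS =====

-- an append-singleton foldl is a map
theorem foldl_append_singleton {α β : Type} (f : α → β) (l : List α) (acc : List β) :
    l.foldl (fun a x => a ++ [f x]) acc = acc ++ l.map f := by
  induction l generalizing acc with
  | nil => simp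
  | cons x xs ih => simp [ih]

-- an append foldl is a flatten
theorem foldl_append_flatten {α : Type} (l : List (List α)) (acc : List α) :
    l.foldl (fun a v => a ++ v) acc = acc ++ l.flatten := by
  induction l generalizing acc with
  | nil => simp
  | cons x xs ih => simp [ih]

-- pointwise unfolding of the B helper (usable on the bare function name)
theorem pvOffsetFlat_eta :
    pvOffsetFlat = fun p : List (List Int) => (p.map (List.map (· + 3))).flatten := by
  funext p; simp [pvOffsetFlat, List.flatMap_def]

-- ===== VERDICT (by name: the statement is the Claim_ definition above) =====
theorem visits_to_seq_naive_spec : Claim_equal_visits_to_seq_naive := by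
  intro patients outcomes dictionary _
  show _ = _
  unfold visits_to_seq_naive visits_to_seq_naive_alt offset_medical_codes
  cases dictionary <;>
    simp only [foldl_append_singleton, foldl_append_flatten, List.nil_append, List.map_map] <;>
    simp [Function.comp_def, pvOffsetFlat_eta]
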